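-- pv_equiv track=rewrite | github.com/lyteword/chspurgeon-tod | file_pnt_extractref.py | extract_exposition_section
-- ===== SOURCE A (Python) =====
-- def extract_exposition_section(lines):
--     """Extract lines under ## Exposition until the next ## header."""
--     in_exposition = False
--     exposition_lines = []
--     for line in lines:
--         if line.startswith("## "):
--             if in_exposition:
--                 break  # stop if we've reached the next section
--             if line.strip() == "## Exposition":
--                 in_exposition = True
--                 continue
--         if in_exposition:
--             exposition_lines.append(line)
--     return exposition_lines
-- ===== SOURCE B (Python) =====
-- def extract_exposition_section(lines):
--     """Extract lines under ## Exposition until the next ## header."""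
--     lines = list(lines)
--     headers = [(i, line) for i, line in enumerate(lines) if line.startswith("## ")]
--     starts = [i for i, line in headers if line.strip() == "## Exposition"]
--     if not starts:
--         return []
--     start = starts[0]
--     ends = [i for i, _ in headers if i > start]
--     end = ends[0] if ends else len(lines)
--     return lines[start + 1:end]
-- ===== Notes on version B (the rewrite author's own statement) =====
-- stated objective: alternative
-- what changed: Replaces A's stateful flag-driven scan by an index-based plan: enumerate all '## ' header positions into a list, pick the first '## Exposition' position and the first header position after it, and return the slice of lines strictly between the two.
import Mathlib
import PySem

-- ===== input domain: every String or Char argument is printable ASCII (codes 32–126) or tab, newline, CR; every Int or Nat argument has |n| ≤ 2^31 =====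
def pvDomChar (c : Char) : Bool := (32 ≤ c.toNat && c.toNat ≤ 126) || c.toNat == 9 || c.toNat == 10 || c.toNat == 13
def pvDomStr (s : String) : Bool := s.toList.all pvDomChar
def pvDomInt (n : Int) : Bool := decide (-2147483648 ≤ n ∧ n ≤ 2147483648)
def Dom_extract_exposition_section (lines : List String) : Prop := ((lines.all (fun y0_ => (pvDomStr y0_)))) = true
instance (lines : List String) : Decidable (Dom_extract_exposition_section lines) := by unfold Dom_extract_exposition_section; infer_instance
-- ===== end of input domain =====

-- ===== PORT A =====
-- B replaces A's stateful flag-driven scan by an index-based plan: build the list of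
-- '## ' header positions, locate the '## Exposition' one and the first header after it,
-- and slice the lines strictly between the two (objective: alternative).
def pvALoop (ls : List String) (inExp : Bool) (acc : List String) : List String :=
  match ls with
  | [] => acc
  | l :: rest =>
    if PySem.Str.startswith l "## " then
      if inExp then acc
      else if PySem.Str.strip l == "## Exposition" then pvALoop rest true acc
      else if inExp then pvALoop rest inExp (acc ++ [l]) else pvALoop rest inExp acc
    else if inExp then pvALoop rest inExp (acc ++ [l]) else pvALoop rest inExp acc

def extract_exposition_section (lines : List String) : List String :=
  pvALoop lines false []

-- ===== PORT B =====
def extract_exposition_section_alt (lines : List String) : List String :=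
  let headers := (PySem.List.enumerate lines 0).filter (fun p => PySem.Str.startswith p.2 "## ")
  let starts := (headers.filter (fun p => PySem.Str.strip p.2 == "## Exposition")).map Prod.fst
  match starts with
  | [] => []
  | start :: _ =>
    let ends := (headers.map Prod.fst).filter (fun i => decide (start < i))
    let e := ends.headD (lines.length : Int)
    PySem.List.slice lines (some (start + 1)) (some e)

-- ===== PRECONDITION & SPEC =====
def Spec_extract_exposition_section (lines : List String) (out : List String) : Prop := out = extract_exposition_section_alt lines
instance (lines : List String) (out : List String) : Decidable (Spec_extract_exposition_section lines out) := by unfold Spec_extract_exposition_section; infer_instance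

-- ===== CLAIM (what is proved, stated in full; the proofs are below) =====
def Claim_equal_extract_exposition_section : Prop := ∀ (lines : List String), Dom_extract_exposition_section lines → Spec_extract_exposition_section lines (extract_exposition_section lines)

-- ===== LEMMAS AND PROOFS =====

-- the two tests: '## ' header, and the '## Exposition' header (proof-local names)
def pvP (l : String) : Bool := PySem.Str.startswith l "## "
def pvQ (l : String) : Bool := pvP l && (PySem.Str.strip l == "## Exposition")
def pvBFind (ls : List String) : Option (List String) :=
  match ls with
  | [] => none
  | l :: rest => if pvQ l then some rest else pvBFind rest
def pvBCollect (ls : List String) : List String :=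
  match ls with
  | [] => []
  | l :: rest => if pvP l then [] else l :: pvBCollect rest

lemma pvALoop_true (ls : List String) : ∀ acc, pvALoop ls true acc = acc ++ pvBCollect ls := by
  induction ls with
  | nil => intro acc; simp [pvALoop, pvBCollect]
  | cons l rest ih =>
    intro acc
    by_cases h : PySem.Chars.startswith l.toList ['#','#',' '] = true
    · simp [pvALoop, pvBCollect, pvP, h]
    · simp [pvALoop, pvBCollect, pvP, h, ih]

lemma pvALoop_false (ls : List String) :
    pvALoop ls false [] = (match pvBFind ls with | none => [] | some rest => pvBCollect rest) := by
  induction ls with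
  | nil => simp [pvALoop, pvBFind]
  | cons l rest ih =>
    by_cases h : PySem.Chars.startswith l.toList ['#','#',' '] = true
    · by_cases h2 : PySem.Str.strip l = "## Exposition"
      · simp [pvALoop, pvBFind, pvQ, pvP, h, h2, pvALoop_true]
      · simp [pvALoop, pvBFind, pvQ, pvP, h, h2, ih]
    · simp [pvALoop, pvBFind, pvQ, pvP, h, ih]

lemma pvBFind_eq (ls : List String) :
    pvBFind ls = (ls.findIdx? pvQ).map (fun k => ls.drop (k + 1)) := by
  induction ls with
  | nil => simp [pvBFind]
  | cons l rest ih =>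
    by_cases h : pvQ l = true
    · simp [pvBFind, h, List.findIdx?_cons]
    · simp [pvBFind, h, List.findIdx?_cons, ih]; rfl

lemma pvBCollect_eq (ls : List String) :
    pvBCollect ls = (match ls.findIdx? pvP with | none => ls | some j => ls.take j) := by
  induction ls with
  | nil => simp [pvBCollect]
  | cons l rest ih =>
    by_cases h : pvP l = true
    · simp [pvBCollect, h, List.findIdx?_cons]
    · simp [pvBCollect, h, List.findIdx?_cons, ih]
      cases rest.findIdx? pvP <;> rfl

lemma head_filter_enum (R : String → Bool) (xs : List String) (s : Int) :
    ((((PySem.List.enumerate xs s).filter (fun p => R p.2)).map Prod.fst).head?) =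
      Option.map (fun k : Nat => s + (k : Int)) (xs.findIdx? R) := by
  induction xs generalizing s with
  | nil => simp [PySem.List.enumerate_nil]
  | cons x xs ih =>
    rw [PySem.List.enumerate_cons]
    by_cases h : R x = true
    · simp [h, List.findIdx?_cons]
    · simp [h, List.findIdx?_cons, ih]
      cases xs.findIdx? R
      · simp
      · simp; omega

lemma starts_head (lines : List String) :
    ((((PySem.List.enumerate lines 0).filter (fun p => PySem.Str.startswith p.2 "## ")).filter
        (fun p => PySem.Str.strip p.2 == "## Exposition")).map Prod.fst).head? =
      Option.map (fun k : Nat => (k : Int)) (lines.findIdx? pvQ) := by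
  rw [List.filter_filter]
  have : ∀ p : Int × String,
      ((PySem.Str.strip p.2 == "## Exposition") && PySem.Str.startswith p.2 "## ") = pvQ p.2 := by
    intro p; simp [pvQ, pvP, Bool.and_comm]
  simp only [this]
  rw [head_filter_enum pvQ lines 0]
  simp

lemma alt_eq (lines : List String) :
    extract_exposition_section_alt lines = (match pvBFind lines with | none => [] | some rest => pvBCollect rest) := by
  rw [pvBFind_eq]
  simp only [extract_exposition_section_alt]
  cases hk : lines.findIdx? pvQ with
  | none =>
    have h0 := starts_head lines
    rw [hk] at h0
    have hnil := List.head?_eq_none_iff.mp (by rw [h0]; rfl)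
    rw [hnil]
    rfl
  | some k =>
    have h0 := starts_head lines
    rw [hk] at h0
    have hlt : k < lines.length := by
      have := List.findIdx?_eq_some_iff_findIdx_eq.mp hk; omega
    -- starts is a cons with head (k : Int)
    obtain ⟨tail, hst⟩ : ∃ tail,
        ((((PySem.List.enumerate lines 0).filter (fun p => PySem.Str.startswith p.2 "## ")).filter
          (fun p => PySem.Str.strip p.2 == "## Exposition")).map Prod.fst) = (k : Int) :: tail := by
      cases hc : ((((PySem.List.enumerate lines 0).filter (fun p => PySem.Str.startswith p.2 "## ")).filter
          (fun p => PySem.Str.strip p.2 == "## Exposition")).map Prod.fst) with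
      | nil => rw [hc] at h0; simp at h0
      | cons a t => rw [hc] at h0; simp at h0; exact ⟨t, by rw [h0]⟩
    rw [hst]
    simp only
    -- split lines and compute ends
    have hsplit : lines = lines.take (k+1) ++ lines.drop (k+1) := (List.take_append_drop _ _).symm
    have hlen : (lines.take (k+1)).length = k+1 := by simp; omega
    have hends : (((PySem.List.enumerate lines 0).filter (fun p => PySem.Str.startswith p.2 "## ")).map
          Prod.fst).filter (fun i => decide ((k : Int) < i)) =
        (((PySem.List.enumerate (lines.drop (k+1)) ((k : Int)+1)).filter
          (fun p => PySem.Str.startswith p.2 "## ")).map Prod.fst) := by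
      conv_lhs => rw [hsplit]
      rw [PySem.List.enumerate_append, List.filter_append, List.map_append, List.filter_append]
      have h1 : ((((PySem.List.enumerate (lines.take (k+1)) 0).filter
            (fun p => PySem.Str.startswith p.2 "## ")).map Prod.fst).filter
            (fun i => decide ((k : Int) < i))) = [] := by
        rw [List.filter_eq_nil_iff]
        intro i hi
        simp only [List.mem_map, List.mem_filter] at hi
        obtain ⟨p, ⟨hpmem, _⟩, hpi⟩ := hi
        rw [PySem.List.mem_enumerate_iff] at hpmem
        obtain ⟨j, hj, hpe⟩ := hpmem
        subst hpe; subst hpi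
        simp only [decide_eq_true_eq, not_lt]
        rw [hlen] at hj
        simp; omega
      have h2 : ((((PySem.List.enumerate (lines.drop (k+1)) (0 + ((lines.take (k+1)).length : Int))).filter
            (fun p => PySem.Str.startswith p.2 "## ")).map Prod.fst).filter
            (fun i => decide ((k : Int) < i))) =
          (((PySem.List.enumerate (lines.drop (k+1)) ((k : Int)+1)).filter
            (fun p => PySem.Str.startswith p.2 "## ")).map Prod.fst) := by
        rw [hlen]
        rw [List.filter_eq_self.mpr]
        · norm_num
        · intro i hi
          simp only [List.mem_map, List.mem_filter] at hi
          obtain ⟨p, ⟨hpmem, _⟩, hpi⟩ := hi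
          rw [PySem.List.mem_enumerate_iff] at hpmem
          obtain ⟨j, hj, hpe⟩ := hpmem
          subst hpe; subst hpi
          simp; omega
      rw [h1, h2, List.nil_append]
    rw [hends]
    have hhead := head_filter_enum pvP (lines.drop (k+1)) ((k : Int)+1)
    have hPconv : (fun p : Int × String => PySem.Str.startswith p.2 "## ") = (fun p : Int × String => pvP p.2) := by
      funext p; simp [pvP]
    rw [hPconv, List.headD_eq_head?_getD, hhead]
    simp only [Option.map_some]
    rw [pvBCollect_eq]
    cases hj : (lines.drop (k+1)).findIdx? pvP with
    | none =>
      simp only [Option.map_none, Option.getD_none]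
      have e1 : ((k : Int) + 1) = ((k+1 : Nat) : Int) := by push_cast; ring
      rw [e1]
      rw [PySem.List.slice_natCast]
      simp
    | some j =>
      simp only [Option.map_some, Option.getD_some]
      have e1 : ((k : Int) + 1) = ((k+1 : Nat) : Int) := by push_cast; ring
      rw [e1]
      rw [PySem.List.slice_natCast_add]

-- ===== VERDICT (by name: the statement is the Claim_ definition above) =====
theorem extract_exposition_section_spec : Claim_equal_extract_exposition_section := by
  intro lines _
  unfold Spec_extract_exposition_section extract_exposition_section
  rw [pvALoop_false]
  exact (alt_eq lines).symm
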